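-- pv_equiv track=rewrite | github.com/stirfrypapi/coding_challenges | coding_challenges/visa_round_1.py | get_total_times
-- ===== SOURCE A (Python) =====
-- def get_total_times(arr):
--     ans = {}
--     for a in arr:
--         if a[0] not in ans:
--             ans[a[0]] = a[1]
--         else:
--             ans[a[0]] = max(a[1], ans[a[0]])
--     return ans
-- ===== SOURCE B (Python) =====
-- def get_total_times(arr):
--     groups = {}
--     for a in arr:
--         groups.setdefault(a[0], []).append(a[1])
--     return {k: max(vs) for k, vs in groups.items()}
-- ===== Notes on version B (the rewrite author's own statement) =====
-- stated objective: alternative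
-- what changed: B groups all values per key into list buckets in one pass and then reduces each bucket with max in a dict comprehension, instead of A's inline running-max update per element.
import Mathlib
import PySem

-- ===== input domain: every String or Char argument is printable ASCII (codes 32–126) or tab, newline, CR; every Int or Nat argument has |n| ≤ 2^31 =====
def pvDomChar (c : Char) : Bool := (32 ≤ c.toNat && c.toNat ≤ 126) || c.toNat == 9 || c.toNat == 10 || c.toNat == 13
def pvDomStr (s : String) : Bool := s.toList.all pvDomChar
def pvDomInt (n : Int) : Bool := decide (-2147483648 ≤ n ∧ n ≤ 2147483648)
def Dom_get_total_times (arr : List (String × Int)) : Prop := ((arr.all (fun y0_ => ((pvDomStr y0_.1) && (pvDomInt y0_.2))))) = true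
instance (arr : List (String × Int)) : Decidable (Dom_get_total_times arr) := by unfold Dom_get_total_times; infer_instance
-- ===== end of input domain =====

-- B groups all values per key into buckets in one pass, then reduces each bucket with max,
-- instead of A's inline running-max update; objective: alternative decomposition (same cost).

-- ===== PORT A =====
-- running-max dict: for a in arr: if a[0] not in ans: ans[a[0]] = a[1] else: ans[a[0]] = max(a[1], ans[a[0]])
def get_total_times (arr : List (String × Int)) : List (String × Int) :=
  (arr.foldl
    (fun ans a =>
      if !ans.contains a.1 then ans.insert a.1 a.2
      else ans.insert a.1 (max a.2 (ans.getD a.1 0)))  -- key present in this branch, so the getD default 0 is never read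
    PySem.Dict.empty).items

-- ===== PORT B =====
-- Python max(vs) on a nonempty list of ints (every bucket B builds is nonempty, so the [] case is never read)
def pvMax (vs : List Int) : Int :=
  match vs with
  | [] => 0
  | x :: t => t.foldl max x

def get_total_times_alt (arr : List (String × Int)) : List (String × Int) :=
  let groups := arr.foldl (fun d a => d.modify a.1 [] (· ++ [a.2])) PySem.Dict.empty
  groups.items.map (fun p => (p.1, pvMax p.2))

-- ===== PRECONDITION & SPEC =====
def Spec_get_total_times (arr : List (String × Int)) (out : List (String × Int)) : Prop := out = get_total_times_alt arr
instance (arr : List (String × Int)) (out : List (String × Int)) : Decidable (Spec_get_total_times arr out) := by unfold Spec_get_total_times; infer_instance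

-- ===== CLAIM (what is proved, stated in full; the proofs are below) =====
def Claim_equal_get_total_times : Prop := ∀ (arr : List (String × Int)), Dom_get_total_times arr → Spec_get_total_times arr (get_total_times arr)

-- ===== LEMMAS AND PROOFS =====

def pvBucketMax (p : String × List Int) : String × Int := (p.1, pvMax p.2)

lemma pvMax_append_singleton (l : List Int) (v : Int) (h : l ≠ []) :
    pvMax (l ++ [v]) = max v (pvMax l) := by
  cases l with
  | nil => exact absurd rfl h
  | cons x t => simp [pvMax, List.foldl_append, max_comm]

-- loop invariant: A's dict is the bucket-wise max image of B's grouping dict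
lemma pv_loop_rel :
    ∀ (arr : List (String × Int)) (dA : PySem.Dict String Int) (dB : PySem.Dict String (List Int)),
      dB.keys.Nodup →
      dA.items = dB.items.map pvBucketMax →
      (∀ p ∈ dB.items, p.2 ≠ []) →
      (arr.foldl
        (fun ans a =>
          if !ans.contains a.1 then ans.insert a.1 a.2
          else ans.insert a.1 (max a.2 (ans.getD a.1 0))) dA).items =
      (arr.foldl (fun d a => d.modify a.1 [] (· ++ [a.2])) dB).items.map pvBucketMax := by
  intro arr
  induction arr with
  | nil => intro dA dB _ hit _; simpa using hit
  | cons a t ih =>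
    intro dA dB hnd hit hne
    obtain ⟨k, v⟩ := a
    have hkeys : dA.keys = dB.keys := by
      simp only [PySem.Dict.keys, hit, List.map_map]
      rfl
    have hndA : dA.keys.Nodup := hkeys ▸ hnd
    have hcont : dA.contains k = dB.contains k := by
      rw [PySem.Dict.contains_eq_decide_mem_keys, PySem.Dict.contains_eq_decide_mem_keys, hkeys]
    simp only [List.foldl_cons]
    by_cases hc : dB.contains k = true
    · -- key already present: both sides overwrite in place
      have hcA : dA.contains k = true := by rw [hcont]; exact hc
      have hmod : dB.modify k [] (· ++ [v]) = dB.insert k (dB.getD k [] ++ [v]) := rfl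
      rw [hmod, hcA]
      simp only [Bool.not_true, Bool.false_eq_true, if_false]
      apply ih
      · exact PySem.Dict.nodup_keys_insert _ _ _ hnd
      · rw [PySem.Dict.items_insert_of_contains _ _ hc,
            PySem.Dict.items_insert_of_contains _ _ hcA, hit]
        simp only [List.map_map]
        apply List.map_congr_left
        intro p hp
        by_cases hpk : p.1 = k
        · have hpb : (p.1, p.2) ∈ dB.items := by simpa using hp
          have hgB : dB.getD k [] = p.2 := by
            subst hpk; exact PySem.Dict.getD_of_mem_items _ hpb hnd []
          have hpa : (p.1, pvMax p.2) ∈ dA.items := by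
            rw [hit]; exact List.mem_map.mpr ⟨p, hp, rfl⟩
          have hgA : dA.getD k 0 = pvMax p.2 := by
            subst hpk; exact PySem.Dict.getD_of_mem_items _ hpa hndA 0
          simp only [Function.comp, pvBucketMax, hpk]
          simp only [beq_self_eq_true, if_pos]
          rw [hgB, hgA, pvMax_append_singleton _ _ (hne p hp)]
        · simp only [Function.comp, pvBucketMax]
          rw [if_neg (by simpa using hpk), if_neg (by simpa using hpk)]
      · intro p hp
        rcases (PySem.Dict.mem_items_insert _ _ _ _).mp hp with h' | h'
        · subst h'; simp
        · exact hne p h'.1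
    · -- fresh key: both sides append
      have hc' : dB.contains k = false := by simpa using hc
      have hcA : dA.contains k = false := by rw [hcont]; exact hc'
      have hmod : dB.modify k [] (· ++ [v]) = dB.insert k (dB.getD k [] ++ [v]) := rfl
      rw [hmod, show dB.getD k [] = [] from by simp [pysem, hc'], hcA]
      simp only [Bool.not_false, if_true]
      apply ih
      · exact PySem.Dict.nodup_keys_insert _ _ _ hnd
      · rw [PySem.Dict.items_insert_of_not_contains _ _ hc',
            PySem.Dict.items_insert_of_not_contains _ _ hcA, hit]
        simp [pvBucketMax, pvMax]
      · intro p hp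
        rcases (PySem.Dict.mem_items_insert _ _ _ _).mp hp with h' | h'
        · subst h'; simp
        · exact hne p h'.1

-- ===== VERDICT (by name: the statement is the Claim_ definition above) =====
theorem get_total_times_spec : Claim_equal_get_total_times := by
  intro arr _
  show get_total_times arr = get_total_times_alt arr
  unfold get_total_times get_total_times_alt
  exact pv_loop_rel arr PySem.Dict.empty PySem.Dict.empty (by simp [PySem.Dict.empty]) (by simp [PySem.Dict.empty]) (by simp [PySem.Dict.empty])
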